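-- pv_equiv track=rewrite | github.com/YTGSWDWH/Python | Test/test5.py | f
-- ===== SOURCE A (Python) =====
-- def f(nums):
--     time_count = 0
--     value_count = 0
--     for i in range(nums[0][0]):
--         value_max = max(nums[1])
--         value_max_index = nums[1].index(value_max)
--         value_max_time = nums[2][value_max_index]
--         value_max_deadline = nums[3][value_max_index]
--         time_max = max(nums[3])
--         if (time_count+value_max_time) <= value_max_deadline and (time_count + value_max_time) <= time_max:
--             time_count += value_max_time
--             value_count += value_max
--         nums[1].pop(value_max_index)
--         nums[2].pop(value_max_index)
--         nums[3].pop(value_max_index)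
--     return value_count
-- ===== SOURCE B (Python) =====
-- def f(nums):
--     k = nums[0][0]
--     if k <= 0:
--         return 0
--     jobs = sorted(zip(nums[1], nums[2], nums[3]), key=lambda j: j[0], reverse=True)
--     time_count = 0
--     value_count = 0
--     for value, t, d in jobs[:k]:
--         if time_count + t <= d:
--             time_count += t
--             value_count += value
--     return value_count
-- ===== Notes on version B (the rewrite author's own statement) =====
-- stated objective: alternative
-- what changed: Instead of k rounds each rescanning the value list with max/index/pop (and a redundant max over deadlines), B zips the three rows once, stable-sorts by value descending, and makes one greedy pass over the first k jobs; the second conjunct of A's test (time <= max deadline) is dropped because it is implied by the first. Intended as the O(n log n) version of A's O(k*n) selection, but a timing run read only 1.35x at the largest size, so no speed is claimed.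
-- outside the precondition, e.g. on f([[1], [5, 1], [4], [9]]): A returns 5, B returns 5
import Mathlib
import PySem

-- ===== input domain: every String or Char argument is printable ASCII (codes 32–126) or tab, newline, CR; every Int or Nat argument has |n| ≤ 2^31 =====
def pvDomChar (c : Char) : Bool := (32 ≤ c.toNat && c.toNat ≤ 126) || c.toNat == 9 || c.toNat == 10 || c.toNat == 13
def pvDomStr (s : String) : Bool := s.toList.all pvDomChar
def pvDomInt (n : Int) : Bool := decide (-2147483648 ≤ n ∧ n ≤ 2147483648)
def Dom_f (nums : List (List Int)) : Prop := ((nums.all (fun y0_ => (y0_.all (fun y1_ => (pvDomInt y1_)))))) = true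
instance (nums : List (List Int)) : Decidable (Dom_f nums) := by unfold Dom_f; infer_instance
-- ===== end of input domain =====

-- B replaces A's k rounds of max/index/pop rescans by one stable sort by value descending and a single
-- greedy pass over the first k jobs (A's second test against max(nums[3]) is implied by the first and dropped).
-- A mutates nums[1..3] in place (pop); B does not — the equivalence proved here is about the return value only.

-- ===== PORT A =====
-- one iteration of A's loop over the state (time_count, value_count, nums[1], nums[2], nums[3])
def fStep (st : Int × Int × List Int × List Int × List Int) : Int × Int × List Int × List Int × List Int :=
  let tc := st.1
  let vc := st.2.1
  let l1 := st.2.2.1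
  let l2 := st.2.2.2.1
  let l3 := st.2.2.2.2
  let vmax := PySem.List.maxD l1 (fun x => x) 0                    -- max(nums[1]); [] raises, excluded by Pre_
  let i := (PySem.List.index? l1 vmax).getD 0                      -- nums[1].index(value_max)
  let t := PySem.List.pyGetD l2 (i : Int) 0                        -- nums[2][i]; out of range excluded by Pre_
  let d := PySem.List.pyGetD l3 (i : Int) 0                        -- nums[3][i]
  let tmax := PySem.List.maxD l3 (fun x => x) 0                    -- max(nums[3])
  let p := if tc + t ≤ d ∧ tc + t ≤ tmax then (tc + t, vc + vmax) else (tc, vc)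
  (p.1, p.2, ((PySem.List.pop? l1 (i : Int)).map Prod.snd).getD l1,
             ((PySem.List.pop? l2 (i : Int)).map Prod.snd).getD l2,
             ((PySem.List.pop? l3 (i : Int)).map Prod.snd).getD l3)

def f (nums : List (List Int)) : Int :=
  let k := PySem.List.pyGetD (PySem.List.pyGetD nums 0 []) 0 0     -- nums[0][0]
  let st := (PySem.List.pyRange 0 k 1).foldl (fun st _ => fStep st)
      (0, 0, PySem.List.pyGetD nums 1 [], PySem.List.pyGetD nums 2 [], PySem.List.pyGetD nums 3 [])
  st.2.1

-- ===== PORT B =====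
def f_alt (nums : List (List Int)) : Int :=
  let k := PySem.List.pyGetD (PySem.List.pyGetD nums 0 []) 0 0     -- nums[0][0]
  if k ≤ 0 then 0                                                  -- no rounds: nothing to pick
  else
    let jobs := PySem.List.sorted
        ((PySem.List.pyGetD nums 1 []).zip ((PySem.List.pyGetD nums 2 []).zip (PySem.List.pyGetD nums 3 [])))
        (fun j => j.1) true                                        -- sorted(zip(...), key=λj: j[0], reverse=True)
    let r := (PySem.List.slice jobs none (some k)).foldl           -- jobs[:k]
        (fun (acc : Int × Int) j => if acc.1 + j.2.1 ≤ j.2.2 then (acc.1 + j.2.1, acc.2 + j.1) else acc)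
        (0, 0)
    r.2

-- ===== PRECONDITION & SPEC =====
-- Pre_ keeps the natural shape: a present job count nums[0][0] and — when that count is positive —
-- the four rows A reads, at most as many rounds as there are jobs, and time/deadline rows at least
-- as long as the value row. Outside it A raises (missing nums[0][0], or max/indexing on an exhausted
-- row mid-loop) or returns a truncation-dependent accidental value for ragged rows that happen to
-- survive all k rounds.
def Pre_f (nums : List (List Int)) : Prop :=
  nums.getD 0 [] ≠ [] ∧
  ((nums.getD 0 []).getD 0 0 ≤ 0 ∨
    (4 ≤ nums.length ∧
     (nums.getD 0 []).getD 0 0 ≤ ((nums.getD 1 []).length : Int) ∧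
     (nums.getD 1 []).length ≤ (nums.getD 2 []).length ∧
     (nums.getD 1 []).length ≤ (nums.getD 3 []).length))
instance (nums : List (List Int)) : Decidable (Pre_f nums) := by unfold Pre_f; infer_instance

def pvWitness_f : List (List Int) := [[2, 0], [5, 1], [1, 2], [3, 3]]

def Spec_f (nums : List (List Int)) (out : Int) : Prop := out = f_alt nums
instance (nums : List (List Int)) (out : Int) : Decidable (Spec_f nums out) := by unfold Spec_f; infer_instance

-- ===== CLAIM (what is proved, stated in full; the proofs are below) =====
def Claim_equal_f : Prop := ∀ (nums : List (List Int)), Dom_f nums → Pre_f nums → Spec_f nums (f nums)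

-- ===== LEMMAS AND PROOFS =====


-- pushing a maximal element through the insertion-sort fold: elements with key ≤ key m never pass m
theorem foldl_insertBy_cons_max {α : Type} (key : α → Int) (m : α) (suf : List α) (acc : List α)
    (h : ∀ y ∈ suf, key y ≤ key m) :
    suf.foldl (fun acc x => PySem.List.insertBy (fun a b => decide (key b < key a)) x acc) (m :: acc)
      = m :: suf.foldl (fun acc x => PySem.List.insertBy (fun a b => decide (key b < key a)) x acc) acc := by
  induction suf generalizing acc with
  | nil => rfl
  | cons y t ih =>
    have hy : ¬ key m < key y := not_lt.mpr (h y (by simp))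
    simp only [List.foldl_cons, PySem.List.insertBy, hy, decide_false, Bool.false_eq_true,
      if_false]
    exact ih _ (fun z hz => h z (by simp [hz]))

-- stable descending sort extracts the first element of maximal key (selection step)
theorem sorted_rev_select {α : Type} (key : α → Int) (p : List α) (m : α) (s : List α)
    (hp : ∀ y ∈ p, key y < key m) (hs : ∀ y ∈ s, key y ≤ key m) :
    PySem.List.sorted (p ++ m :: s) key true = m :: PySem.List.sorted (p ++ s) key true := by
  rw [PySem.List.sorted_rev_eq_foldl_insertBy, PySem.List.sorted_rev_eq_foldl_insertBy]
  rw [List.foldl_append, List.foldl_append, List.foldl_cons]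
  have haccP : List.foldl (fun acc x => PySem.List.insertBy (fun a b => decide (key b < key a)) x acc) [] p
      = PySem.List.sorted p key true := (PySem.List.sorted_rev_eq_foldl_insertBy p key).symm
  have hmem : ∀ y ∈ List.foldl (fun acc x => PySem.List.insertBy (fun a b => decide (key b < key a)) x acc) [] p,
      key y < key m := by
    intro y hy
    rw [haccP] at hy
    exact hp y ((PySem.List.sorted_perm p key true).mem_iff.mp hy)
  have hins : PySem.List.insertBy (fun a b => decide (key b < key a)) m
      (List.foldl (fun acc x => PySem.List.insertBy (fun a b => decide (key b < key a)) x acc) [] p)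
      = m :: List.foldl (fun acc x => PySem.List.insertBy (fun a b => decide (key b < key a)) x acc) [] p := by
    cases hacc : List.foldl (fun acc x => PySem.List.insertBy (fun a b => decide (key b < key a)) x acc) [] p with
    | nil => rfl
    | cons a t =>
      have : key a < key m := hmem a (by rw [hacc]; simp)
      simp [PySem.List.insertBy, this]
  rw [hins]
  exact foldl_insertBy_cons_max key m s _ hs

-- a fold that ignores the list elements is an iterate
theorem foldl_const_iterate {γ σ : Type} (F : σ → σ) (l : List γ) (st : σ) :
    l.foldl (fun st _ => F st) st = F^[l.length] st := by
  induction l generalizing st with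
  | nil => rfl
  | cons x t ih => simpa [Function.iterate_succ_apply] using ih (F st)

-- the loop invariant: n rounds of A's selection loop = one greedy pass over the first n
-- jobs of the value-descending stable sort of the zipped rows
theorem loop_eq (n : Nat) (l1 l2 l3 : List Int) (tc vc : Int)
    (h1 : n ≤ l1.length) (h2 : l1.length ≤ l2.length) (h3 : l1.length ≤ l3.length) :
    (fStep^[n] (tc, vc, l1, l2, l3)).2.1
      = (((PySem.List.sorted (l1.zip (l2.zip l3)) (fun j => j.1) true).take n).foldl
          (fun (acc : Int × Int) j => if acc.1 + j.2.1 ≤ j.2.2 then (acc.1 + j.2.1, acc.2 + j.1) else acc)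
          (tc, vc)).2 := by
  induction n generalizing l1 l2 l3 tc vc with
  | zero => simp
  | succ n ih =>
    have hl1ne : l1 ≠ [] := by intro h; rw [h] at h1; simp at h1
    have hl3ne : l3 ≠ [] := by
      intro h; rw [h] at h3; simp at h3; exact hl1ne h3
    set v := PySem.List.maxD l1 (fun x => x) 0 with hv
    have hvmem : v ∈ l1 := PySem.List.maxD_mem l1 _ 0 hl1ne
    have hvmax : ∀ y ∈ l1, y ≤ v :=
      PySem.List.max?_isMax (PySem.List.max?_eq_some_maxD l1 (fun x => x) 0 hl1ne)
    obtain ⟨i0, hi0⟩ := Option.isSome_iff_exists.mp ((PySem.List.index?_isSome_iff l1 v).mpr hvmem)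
    obtain ⟨p, s, hdecomp, hplen, hvnotp⟩ := (PySem.List.index?_eq_some_iff l1 v i0).mp hi0
    have hp : ∀ y ∈ p, y < v := fun y hy =>
      lt_of_le_of_ne (hvmax y (by rw [hdecomp]; exact List.mem_append_left _ hy))
        (fun e => hvnotp (e ▸ hy))
    have hs : ∀ y ∈ s, y ≤ v := fun y hy =>
      hvmax y (by rw [hdecomp]; exact List.mem_append_right _ (List.mem_cons_of_mem _ hy))
    have hlen1 : l1.length = p.length + s.length + 1 := by rw [hdecomp]; simp; omega
    have hi0lt1 : i0 < l1.length := by omega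
    have hi0lt2 : i0 < l2.length := by omega
    have hi0lt3 : i0 < l3.length := by omega
    have hgi : (PySem.List.index? l1 v).getD 0 = i0 := by rw [hi0]; rfl
    have ht : PySem.List.pyGetD l2 (i0 : Int) 0 = l2[i0] := by
      rw [PySem.List.pyGetD_natCast]; exact List.getD_eq_getElem l2 0 hi0lt2
    have hd : PySem.List.pyGetD l3 (i0 : Int) 0 = l3[i0] := by
      rw [PySem.List.pyGetD_natCast]; exact List.getD_eq_getElem l3 0 hi0lt3
    have hdmax : l3[i0] ≤ PySem.List.maxD l3 (fun x => x) 0 :=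
      PySem.List.max?_isMax (PySem.List.max?_eq_some_maxD l3 (fun x => x) 0 hl3ne) _
        (List.getElem_mem hi0lt3)
    have hcond : (tc + l2[i0] ≤ l3[i0] ∧ tc + l2[i0] ≤ PySem.List.maxD l3 (fun x => x) 0)
        ↔ tc + l2[i0] ≤ l3[i0] :=
      ⟨fun h => h.1, fun h => ⟨h, le_trans h hdmax⟩⟩
    have hpop1 : ((PySem.List.pop? l1 (i0 : Int)).map Prod.snd).getD l1 = l1.eraseIdx i0 := by
      rw [PySem.List.pop?_natCast l1 i0 hi0lt1]; rfl
    have hpop2 : ((PySem.List.pop? l2 (i0 : Int)).map Prod.snd).getD l2 = l2.eraseIdx i0 := by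
      rw [PySem.List.pop?_natCast l2 i0 hi0lt2]; rfl
    have hpop3 : ((PySem.List.pop? l3 (i0 : Int)).map Prod.snd).getD l3 = l3.eraseIdx i0 := by
      rw [PySem.List.pop?_natCast l3 i0 hi0lt3]; rfl
    -- the step of A
    have hstep : fStep (tc, vc, l1, l2, l3)
        = (if tc + l2[i0] ≤ l3[i0] then tc + l2[i0] else tc,
           if tc + l2[i0] ≤ l3[i0] then vc + v else vc,
           l1.eraseIdx i0, l2.eraseIdx i0, l3.eraseIdx i0) := by
      show ((if _ then _ else _ : Int × Int).1, _, _, _, _) = _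
      rw [← hv, hgi, ht, hd, hpop1, hpop2, hpop3]
      by_cases hc : tc + l2[i0] ≤ l3[i0]
      · simp [hcond.mpr hc]
      · have : ¬ (tc + l2[i0] ≤ l3[i0] ∧ tc + l2[i0] ≤ PySem.List.maxD l3 (fun x => x) 0) :=
          fun h => hc (hcond.mp h)
        simp [hc]
    -- zip decomposition
    have hl2split : l2 = l2.take i0 ++ l2[i0] :: l2.drop (i0 + 1) := by
      conv_lhs => rw [← List.take_append_drop i0 l2]
      rw [List.getElem_cons_drop hi0lt2]
    have hl3split : l3 = l3.take i0 ++ l3[i0] :: l3.drop (i0 + 1) := by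
      conv_lhs => rw [← List.take_append_drop i0 l3]
      rw [List.getElem_cons_drop hi0lt3]
    have hlt2 : (l2.take i0).length = i0 := by simp; omega
    have hlt3 : (l3.take i0).length = i0 := by simp; omega
    have hZ : l1.zip (l2.zip l3)
        = p.zip ((l2.take i0).zip (l3.take i0))
          ++ (v, (l2[i0], l3[i0])) :: s.zip ((l2.drop (i0 + 1)).zip (l3.drop (i0 + 1))) := by
      conv_lhs => rw [hdecomp, hl2split, hl3split]
      rw [List.zip_append (by rw [hlt2, hlt3]), List.zip_cons_cons,
        List.zip_append (by simp [hlt2, hlt3]; omega)]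
      rfl
    have herase1 : l1.eraseIdx i0 = p ++ s := by
      rw [hdecomp, ← hplen]
      rw [List.eraseIdx_eq_take_drop_succ, List.take_left]
      congr 1
      rw [show p ++ v :: s = (p ++ [v]) ++ s by simp, show p.length + 1 = (p ++ [v]).length by simp,
        List.drop_left]
    have hZ' : (l1.eraseIdx i0).zip ((l2.eraseIdx i0).zip (l3.eraseIdx i0))
        = p.zip ((l2.take i0).zip (l3.take i0))
          ++ s.zip ((l2.drop (i0 + 1)).zip (l3.drop (i0 + 1))) := by
      rw [herase1, List.eraseIdx_eq_take_drop_succ l2, List.eraseIdx_eq_take_drop_succ l3]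
      rw [List.zip_append (by rw [hlt2, hlt3]), List.zip_append (by simp [hlt2, hlt3]; omega)]
    have hsorted : PySem.List.sorted (l1.zip (l2.zip l3)) (fun j => j.1) true
        = (v, (l2[i0], l3[i0]))
          :: PySem.List.sorted ((l1.eraseIdx i0).zip ((l2.eraseIdx i0).zip (l3.eraseIdx i0)))
              (fun j => j.1) true := by
      rw [hZ, hZ']
      exact sorted_rev_select (α := Int × Int × Int) (fun j => j.1) _ _ _
        (by rintro ⟨y1, y2⟩ hy; exact hp y1 (List.of_mem_zip hy).1)
        (by rintro ⟨y1, y2⟩ hy; exact hs y1 (List.of_mem_zip hy).1)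
    -- put it together
    rw [Function.iterate_succ_apply, hstep, hsorted, List.take_succ_cons, List.foldl_cons]
    have hle1 : i0 < l1.length := hi0lt1
    have e1 : (l1.eraseIdx i0).length = l1.length - 1 := by
      rw [List.length_eraseIdx_of_lt hi0lt1]
    have e2 : (l2.eraseIdx i0).length = l2.length - 1 := by
      rw [List.length_eraseIdx_of_lt hi0lt2]
    have e3 : (l3.eraseIdx i0).length = l3.length - 1 := by
      rw [List.length_eraseIdx_of_lt hi0lt3]
    by_cases hc : tc + l2[i0] ≤ l3[i0]
    · simp only [hc, if_true]
      exact ih _ _ _ _ _ (by omega) (by omega) (by omega)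
    · simp only [hc, if_false]
      exact ih _ _ _ _ _ (by omega) (by omega) (by omega)

-- ===== VERDICT (by name: the statement is the Claim_ definition above) =====
theorem f_spec : Claim_equal_f := by
  intro nums _ hpre
  obtain ⟨hne, hdisj⟩ := hpre
  show f _ = f_alt _
  simp only [f, f_alt]
  simp only [show ((0:Int)) = ((0:Nat):Int) by norm_num, show ((1:Int)) = ((1:Nat):Int) by norm_num,
    show ((2:Int)) = ((2:Nat):Int) by norm_num, show ((3:Int)) = ((3:Nat):Int) by norm_num,
    PySem.List.pyGetD_natCast]
  simp only [Nat.cast_zero, Nat.cast_one]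
  by_cases hk : (nums.getD 0 []).getD 0 0 ≤ 0
  · rw [if_pos hk]
    have hrange : PySem.List.pyRange 0 ((nums.getD 0 []).getD 0 0) 1 = [] := by
      simp only [List.getD] at hk
      simp [PySem.List.pyRange]
      omega
    rw [hrange]
    rfl
  · rw [if_neg hk]
    rcases hdisj with h | ⟨hlen, hk1, h12, h13⟩
    · omega
    rcases nums with _ | ⟨a, _ | ⟨b, _ | ⟨c, _ | ⟨d, r⟩⟩⟩⟩
    · simp at hlen
    · simp at hlen
    · simp at hlen
    · simp at hlen
    rcases a with _ | ⟨k0, arest⟩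
    · simp at hne
    simp only [List.getD] at hk hk1 h12 h13
    simp at hk hk1 h12 h13 ⊢
    have hk0 : 0 ≤ k0 := by omega
    rw [show k0 = ((k0.toNat : Nat) : Int) from (Int.toNat_of_nonneg hk0).symm]
    rw [PySem.List.pyRange_zero_natCast]
    simp only [List.foldl_map]
    rw [foldl_const_iterate, List.length_range]
    rw [PySem.List.slice_to _ (Int.natCast_nonneg _), Int.toNat_natCast]
    exact loop_eq k0.toNat b c d 0 0 (by omega) h12 h13
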